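-- pv_equiv track=rewrite | github.com/Tomin1/libsudoku | libsudoku/printers.py | convert_to_character
-- ===== SOURCE A (Python) =====
-- def convert_to_character(value:int) -> str:
--     """Converts native number presentation to character (string)
--
--     For example:
--     >>> convert_to_character(0)
--     '0'
--     >>> convert_to_character(1)
--     '1'
--     >>> convert_to_character(0b000100000)
--     '6'
--     """
--     if value in (0, 1):
--         return str(value)
--     loops = 0
--     while(value):
--         value = value >> 1
--         loops += 1
--     return str(loops)
-- ===== SOURCE B (Python) =====
-- def convert_to_character(value: int) -> str:
--     return str(value.bit_length())
-- ===== Notes on version B (the rewrite author's own statement) =====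
-- stated objective: idiomatic
-- what changed: Replaces the special-case guard and the shift-counting while loop with the closed form str(value.bit_length()), which already yields '0' and '1' for the two guarded cases.
import Mathlib
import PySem

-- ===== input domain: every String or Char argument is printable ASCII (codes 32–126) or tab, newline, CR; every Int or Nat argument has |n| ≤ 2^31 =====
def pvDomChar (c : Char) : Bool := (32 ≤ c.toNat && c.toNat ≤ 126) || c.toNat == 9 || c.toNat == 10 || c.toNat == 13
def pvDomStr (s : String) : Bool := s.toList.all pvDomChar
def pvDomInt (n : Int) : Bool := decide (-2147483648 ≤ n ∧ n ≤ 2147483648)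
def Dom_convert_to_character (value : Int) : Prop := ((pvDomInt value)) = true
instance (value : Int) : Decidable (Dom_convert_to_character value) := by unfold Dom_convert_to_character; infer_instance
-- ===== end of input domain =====

-- B replaces A's special-case guard and shift-counting loop with the closed form
-- str(value.bit_length()) (objective: idiomatic). A does not terminate for value < 0,
-- so Pre_ restricts to 0 ≤ value.


-- ===== PORT A =====
-- the while loop; Pre_ guarantees 0 ≤ value, on which Python's `value >> 1` on int
-- is exactly Nat shiftRight, so carrying the value as a Nat is exact there
def ctcLoop (value : Nat) (loops : Int) : Int :=
  if h : value = 0 then loops else ctcLoop (value >>> 1) (loops + 1)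
decreasing_by
  simpa [Nat.shiftRight_one] using Nat.div_lt_self (Nat.pos_of_ne_zero h) one_lt_two

def convert_to_character (value : Int) : String :=
  if value = 0 ∨ value = 1 then PySem.Int.toStr value
  else PySem.Int.toStr (ctcLoop value.toNat 0)

-- ===== PORT B =====
-- Python's int.bit_length() on a nonnegative int is exactly Nat.size (Pre_ gives 0 ≤ value)
def convert_to_character_alt (value : Int) : String :=
  PySem.Int.toStr (Int.ofNat value.toNat.size)

-- ===== PRECONDITION & SPEC =====
-- Pre_ excludes value < 0, on which A's while loop never terminates (value >> 1 stays -1).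
def Pre_convert_to_character (value : Int) : Prop := 0 ≤ value
instance (value : Int) : Decidable (Pre_convert_to_character value) := by unfold Pre_convert_to_character; infer_instance
def pvWitness_convert_to_character : Int := (32)

def Spec_convert_to_character (value : Int) (out : String) : Prop := out = convert_to_character_alt value
instance (value : Int) (out : String) : Decidable (Spec_convert_to_character value out) := by unfold Spec_convert_to_character; infer_instance

-- ===== CLAIM (what is proved, stated in full; the proofs are below) =====
def Claim_equal_convert_to_character : Prop := ∀ (value : Int), Dom_convert_to_character value → Pre_convert_to_character value → Spec_convert_to_character value (convert_to_character value)

-- ===== LEMMAS AND PROOFS =====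
theorem ctc_size_div2 (n : Nat) (h : n ≠ 0) : n.size = (n / 2).size + 1 := by
  conv_lhs => rw [← Nat.bit_testBit_zero_shiftRight_one n]
  rw [Nat.size_bit (by rw [Nat.bit_testBit_zero_shiftRight_one]; exact h), Nat.shiftRight_one]

theorem ctcLoop_eq (n : Nat) (acc : Int) : ctcLoop n acc = acc + n.size := by
  induction n using Nat.strong_induction_on generalizing acc with
  | _ n ih =>
    unfold ctcLoop
    split
    · simp [*, Nat.size_zero]
    · rename_i h
      rw [ih (n >>> 1) (by simpa [Nat.shiftRight_one] using Nat.div_lt_self (Nat.pos_of_ne_zero h) one_lt_two),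
          Nat.shiftRight_one, ctc_size_div2 n h]
      push_cast; ring

-- ===== VERDICT (by name: the statement is the Claim_ definition above) =====
theorem convert_to_character_spec : Claim_equal_convert_to_character := by
  intro value _ hpre
  unfold Spec_convert_to_character convert_to_character convert_to_character_alt
  split
  · rename_i h
    rcases h with h | h <;> subst h <;> rfl
  · rw [ctcLoop_eq]; norm_num
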